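-- pv_equiv track=rewrite | github.com/majung2/CTpractice | python/2020하반기/2020하반기라인/02.py | solution
-- ===== SOURCE A (Python) =====
-- def solution(ball, order):
--     answer = []
--     while(ball):
--         if order.index(ball[0]) > order.index(ball[-1]): # 오른쪽 끝 빼기
--             answer.append(ball.pop())
--         else:
--             answer.append(ball.pop(0))
--
--     return answer
-- ===== SOURCE B (Python) =====
-- def solution(ball, order):
--     # O(n+m) two-pointer version; return-value equivalent to A (A empties `ball` in place, B does not mutate it)
--     rank = {}
--     for i, v in enumerate(order):
--         if v not in rank:
--             rank[v] = i
--     answer = []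
--     i, j = 0, len(ball) - 1
--     while i <= j:
--         if rank[ball[i]] > rank[ball[j]]:
--             answer.append(ball[j])
--             j -= 1
--         else:
--             answer.append(ball[i])
--             i += 1
--     return answer
-- ===== Notes on version B (the rewrite author's own statement) =====
-- stated objective: faster
-- what changed: Replaced the destructive pop-loop that calls order.index on both ends at every step with a precomputed first-occurrence rank dictionary and two index pointers walking inward over an unmodified ball list.
import Mathlib
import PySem

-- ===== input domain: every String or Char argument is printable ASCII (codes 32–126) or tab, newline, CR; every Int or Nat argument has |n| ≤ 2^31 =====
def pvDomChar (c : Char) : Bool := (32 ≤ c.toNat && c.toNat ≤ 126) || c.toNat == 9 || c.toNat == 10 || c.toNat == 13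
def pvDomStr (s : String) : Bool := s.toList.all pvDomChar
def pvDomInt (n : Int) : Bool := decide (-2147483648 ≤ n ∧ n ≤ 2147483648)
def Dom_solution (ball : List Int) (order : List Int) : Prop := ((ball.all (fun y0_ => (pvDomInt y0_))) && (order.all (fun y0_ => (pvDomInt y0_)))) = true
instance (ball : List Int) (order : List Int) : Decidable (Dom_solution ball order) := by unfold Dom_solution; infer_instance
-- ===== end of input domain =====

-- B replaces A's destructive pop-loop (which calls order.index on both ends at every step) with a
-- precomputed first-occurrence rank dict and two inward-moving index pointers; the equivalence is
-- about the RETURN value only (Python A empties `ball` in place, B leaves it untouched).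


-- ===== PORT A =====
-- while(ball): compare order.index(ball[0]) with order.index(ball[-1]); pop back or front into
-- answer (the fuel parameter only makes the recursion structural: ball shrinks by one per step,
-- so fuel = initial length is never exhausted)
def solLoopA (order : List Int) : Nat → List Int → List Int → List Int
  | 0, _, acc => acc
  | _, [], acc => acc
  | fuel + 1, x :: xs, acc =>
    let lastv := PySem.List.pyGetD (x :: xs) (-1) 0     -- ball[-1]; in range since ball ≠ []
    if (PySem.List.index? order (PySem.List.pyGetD (x :: xs) 0 0)).getD 0
         > (PySem.List.index? order lastv).getD 0 then  -- order.index never raises under Pre_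
      solLoopA order fuel ((x :: xs).dropLast) (acc ++ [lastv])   -- answer.append(ball.pop())
    else
      solLoopA order fuel xs (acc ++ [x])                          -- answer.append(ball.pop(0))

def solution (ball : List Int) (order : List Int) : List Int :=
  solLoopA order ball.length ball []

-- ===== PORT B =====
-- rank = {} ; for i, v in enumerate(order): if v not in rank: rank[v] = i
def buildRank (order : List Int) : PySem.Dict Int Int :=
  (PySem.List.enumerate order 0).foldl
    (fun d p => if d.contains p.2 then d else d.insert p.2 p.1) PySem.Dict.empty

-- while i <= j: append the end whose rank is smaller (front on ties) and move that pointer inward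
-- (fuel only makes the while-loop structural: j - i shrinks each step, fuel = len(ball) suffices)
def solLoopB (rank : PySem.Dict Int Int) (ball : List Int) : Nat → Int → Int → List Int → List Int
  | 0, _, _, acc => acc
  | fuel + 1, i, j, acc =>
    if i ≤ j then
      let bi := PySem.List.pyGetD ball i 0    -- ball[i]; in range since 0 ≤ i ≤ j ≤ len-1
      let bj := PySem.List.pyGetD ball j 0
      if rank.getD bi 0 > rank.getD bj 0 then -- rank[...] never raises under Pre_
        solLoopB rank ball fuel i (j - 1) (acc ++ [bj])
      else
        solLoopB rank ball fuel (i + 1) j (acc ++ [bi])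
    else acc

def solution_alt (ball : List Int) (order : List Int) : List Int :=
  solLoopB (buildRank order) ball ball.length 0 (PySem.List.len ball - 1) []

-- ===== PRECONDITION & SPEC =====
-- Pre_ excludes exactly the inputs where some ball element is absent from order: there A's
-- order.index raises ValueError (and B's rank[...] raises KeyError).
def Pre_solution (ball : List Int) (order : List Int) : Prop := ∀ x ∈ ball, x ∈ order
instance (ball : List Int) (order : List Int) : Decidable (Pre_solution ball order) := by unfold Pre_solution; infer_instance
def pvWitness_solution : List Int × List Int := ([1, 3, 2, 3], [3, 1, 2])

def Spec_solution (ball : List Int) (order : List Int) (out : List Int) : Prop := out = solution_alt ball order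
instance (ball : List Int) (order : List Int) (out : List Int) : Decidable (Spec_solution ball order out) := by unfold Spec_solution; infer_instance

-- ===== CLAIM (what is proved, stated in full; the proofs are below) =====
def Claim_equal_solution : Prop := ∀ (ball : List Int) (order : List Int), Dom_solution ball order → Pre_solution ball order → Spec_solution ball order (solution ball order)

-- ===== LEMMAS AND PROOFS =====

-- the rank dict built by B's first loop maps each key of `l` to (start + its first index in `l`)
theorem buildRank_aux (l : List Int) : ∀ (s : Int) (d : PySem.Dict Int Int) (v : Int),
    ((PySem.List.enumerate l s).foldl
      (fun d p => if d.contains p.2 then d else d.insert p.2 p.1) d).get? v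
    = ((d.get? v).or ((PySem.List.index? l v).map (fun k => s + (k : Int)))) := by
  induction l with
  | nil => intro s d v; simp [PySem.List.enumerate_nil, PySem.List.index?]
  | cons x xs ih =>
    intro s d v
    rw [PySem.List.enumerate_cons]
    simp only [List.foldl_cons]
    rw [ih]
    by_cases hxv : x = v
    · subst hxv
      rw [PySem.List.index?_cons_self]
      by_cases hc : d.contains x
      · simp only [hc, if_true]
        have : (d.get? x).isSome := by
          rw [← PySem.Dict.contains_eq_isSome_get?]; exact hc
        obtain ⟨w, hw⟩ := Option.isSome_iff_exists.mp this
        simp [hw]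
      · simp only [hc, Bool.false_eq_true, if_false]
        have hnone : d.get? x = none := by
          cases hg : d.get? x with
          | none => rfl
          | some w =>
            exfalso
            have hcs := PySem.Dict.contains_eq_isSome_get? d x
            rw [hg] at hcs; simp at hcs; exact hc hcs
        simp [PySem.Dict.get?_insert_self, hnone]
    · rw [PySem.List.index?_cons_of_ne xs hxv]
      have hg : (if d.contains x then d else d.insert x s).get? v = d.get? v := by
        by_cases hc : d.contains x
        · simp [hc]
        · simp only [hc, Bool.false_eq_true, if_false]
          exact PySem.Dict.get?_insert_of_ne d s (Ne.symm hxv)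
      rw [hg]
      cases hidx : PySem.List.index? xs v with
      | none => simp
      | some k =>
        have : s + 1 + (k:Int) = s + ((k:Int)+1) := by ring
        simp [this]

-- looked up through getD, B's rank of a present value is A's order.index of it
theorem buildRank_getD (order : List Int) (v : Int) (hv : v ∈ order) :
    (buildRank order).getD v 0 = (((PySem.List.index? order v).getD 0 : Nat) : Int) := by
  obtain ⟨k, hk⟩ := Option.isSome_iff_exists.mp ((PySem.List.index?_isSome_iff order v).mpr hv)
  rw [PySem.Dict.getD_eq_get?_getD, buildRank, buildRank_aux]
  simp at hk
  simp [hk]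

-- the two-pointer loop over ball[i..j] computes exactly the pop-loop over the slice ball[i..j]
theorem loop_eq (order ball : List Int) (hpre : ∀ x ∈ ball, x ∈ order) :
    ∀ (n fA fB : Nat) (i j : Int) (acc : List Int), n ≤ fA → n ≤ fB → 0 ≤ i → j < ball.length →
      (j + 1 - i).toNat = n →
      solLoopB (buildRank order) ball fB i j acc
        = solLoopA order fA ((ball.drop i.toNat).take n) acc := by
  intro n
  induction n with
  | zero =>
    intro fA fB i j acc _ _ hi hj hn
    have hij : ¬ i ≤ j := by omega
    cases fB <;> cases fA <;> simp [solLoopA, solLoopB, hij]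
  | succ n ih =>
    intro fA fB i j acc hfA hfB hi hj hn
    obtain ⟨gA, rfl⟩ : ∃ g, fA = g + 1 := ⟨fA - 1, by omega⟩
    obtain ⟨gB, rfl⟩ : ∃ g, fB = g + 1 := ⟨fB - 1, by omega⟩
    have hij : i ≤ j := by omega
    set a := i.toNat with ha_def
    set b := j.toNat with hb_def
    have hab : b = a + n := by omega
    have hblen : b < ball.length := by omega
    have halen : a < ball.length := by omega
    have hdrop : ball.drop a = ball[a] :: ball.drop (a + 1) := List.drop_eq_getElem_cons halen
    have hs : (ball.drop a).take (n + 1) = ball[a] :: (ball.drop (a + 1)).take n := by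
      rw [hdrop]; rfl
    have hslen : ((ball.drop a).take (n + 1)).length = n + 1 := by
      simp [List.length_take, List.length_drop]; omega
    have hlast : ∀ h, ((ball.drop a).take (n + 1)).getLast h = ball[b] := by
      intro h
      rw [List.getLast_eq_getElem]
      have h1 : ((ball.drop a).take (n+1)).length - 1 = n := by omega
      simp only [h1]
      rw [List.getElem_take, List.getElem_drop]
      congr 1; omega
    have hbi : PySem.List.pyGetD ball i 0 = ball[a] :=
      PySem.List.pyGetD_eq_getElem ball 0 hi (by omega)
    have hbj : PySem.List.pyGetD ball j 0 = ball[b] :=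
      PySem.List.pyGetD_eq_getElem ball 0 (by omega) (by omega)
    have hlastv : PySem.List.pyGetD ((ball.drop a).take (n+1)) (-1) 0 = ball[b] := by
      rw [PySem.List.pyGetD_neg_one _ _ (by rw [hs]; simp)]
      exact hlast _
    have hmema : ball[a] ∈ order := hpre _ (List.getElem_mem _)
    have hmemb : ball[b] ∈ order := hpre _ (List.getElem_mem _)
    have hdl : (ball[a] :: (ball.drop (a + 1)).take n).dropLast = (ball.drop a).take n := by
      rw [← hs, List.dropLast_eq_take, hslen]
      simp [List.take_take]
    rw [hs] at hlastv
    rw [hs]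
    simp only [solLoopA, solLoopB, if_pos hij, hlastv, hbi, hbj, PySem.List.pyGetD_zero_cons]
    by_cases hgt : (PySem.List.index? order ball[a]).getD 0 > (PySem.List.index? order ball[b]).getD 0
    · have hB : (buildRank order).getD ball[a] 0 > (buildRank order).getD ball[b] 0 := by
        rw [buildRank_getD order _ hmema, buildRank_getD order _ hmemb]; exact_mod_cast hgt
      rw [if_pos hB, if_pos hgt, hdl]
      have := ih gA gB i (j - 1) (acc ++ [ball[b]]) (by omega) (by omega) hi (by omega) (by omega)
      rw [← ha_def] at this
      exact this
    · have hB : ¬ (buildRank order).getD ball[a] 0 > (buildRank order).getD ball[b] 0 := by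
        rw [buildRank_getD order _ hmema, buildRank_getD order _ hmemb]
        intro h; exact hgt (by exact_mod_cast h)
      rw [if_neg hB, if_neg hgt]
      have := ih gA gB (i + 1) j (acc ++ [ball[a]]) (by omega) (by omega) (by omega) hj (by omega)
      have hnext : (i + 1).toNat = a + 1 := by omega
      rw [hnext] at this
      exact this

-- ===== VERDICT (by name: the statement is the Claim_ definition above) =====
theorem solution_spec : Claim_equal_solution := by
  intro ball order _ hpre
  unfold Spec_solution solution solution_alt
  have h := loop_eq order ball hpre ball.length ball.length ball.length 0 (PySem.List.len ball - 1) []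
    (le_refl _) (le_refl _) (by omega) (by simp [PySem.List.len_eq]) (by simp [PySem.List.len_eq])
  simpa using h.symm
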